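-- pv_equiv track=rewrite | github.com/TheNitromeFan/baekjoon | 06379.py | scramble_sorted
-- ===== SOURCE A (Python) =====
-- import string
--
-- def scramble_sorted(items):
--     numbers, words = [], []
--     is_digit = [False] * len(items)
--     for idx, item in enumerate(items):
--         if item[-1] in string.digits:
--             numbers.append(int(item))
--             is_digit[idx] = True
--         else:
--             words.append(item)
--     numbers.sort()
--     words.sort(key=lambda x: x.lower())
--     sorted_items = []
--     i, j = 0, 0
--     for idx in range(len(items)):
--         if is_digit[idx]:
--             sorted_items.append(str(numbers[i]))
--             i += 1
--         else:
--             sorted_items.append(words[j])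
--             j += 1
--     return sorted_items
-- ===== SOURCE B (Python) =====
-- import string
--
--
-- def scramble_sorted(items):
--     n = len(items)
--     numeric = [s[-1] in string.digits for s in items]
--     keys = [int(s) if numeric[i] else s.lower() for i, s in enumerate(items)]
--
--     # stable rank of slot j among slots of its own kind:
--     # strictly smaller keys anywhere, plus equal keys at earlier slots
--     ranks = []
--     for j in range(n):
--         r = 0
--         for m in range(n):
--             if numeric[m] == numeric[j] and \
--                (keys[m] < keys[j] or (keys[m] == keys[j] and m < j)):
--                 r += 1
--         ranks.append(r)
--
--     out = []
--     seen_num = seen_word = 0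
--     for s in items:
--         t = s[-1] in string.digits
--         r = seen_num if t else seen_word
--         for j in range(n):
--             if numeric[j] == t and ranks[j] == r:
--                 out.append(str(keys[j]) if t else items[j])
--                 break
--         if t:
--             seen_num += 1
--         else:
--             seen_word += 1
--     return out
-- ===== Notes on version B (the rewrite author's own statement) =====
-- stated objective: alternative
-- what changed: B eliminates sorting altogether: instead of A's partition-into-two-lists / sort each / interleave-with-cursors, B computes for every slot its stable rank among slots of the same kind by counting pairwise key comparisons, then fills each output position by looking up the slot whose rank equals that position's running same-kind counter (a rank-based gather, no sort call, no partitioned lists).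
import Mathlib
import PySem

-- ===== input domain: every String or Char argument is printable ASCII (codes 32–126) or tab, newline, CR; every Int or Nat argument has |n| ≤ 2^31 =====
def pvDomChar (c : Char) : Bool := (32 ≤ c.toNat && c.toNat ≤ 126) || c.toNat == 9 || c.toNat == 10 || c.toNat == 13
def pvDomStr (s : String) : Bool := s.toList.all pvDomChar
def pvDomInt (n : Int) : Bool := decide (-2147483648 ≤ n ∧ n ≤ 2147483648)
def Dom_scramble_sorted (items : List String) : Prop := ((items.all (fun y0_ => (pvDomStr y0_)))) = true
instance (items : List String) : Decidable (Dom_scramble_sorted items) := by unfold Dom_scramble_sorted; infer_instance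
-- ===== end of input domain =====

-- B computes each slot's stable rank by pairwise counting and gathers output positions by rank lookup — no sort call, no partitioned lists (objective: alternative algorithm; slower asymptotically, O(n^2) vs O(n log n)).


-- shared primitive helpers (both Pythons contain the identical expressions `item[-1] in string.digits` and `int(item)`)
def pyLastDigit (s : String) : Bool := "0123456789".toList.contains ((PySem.Str.pyGet? s (-1)).getD ' ')
def pyParseInt (s : String) : Int := (PySem.Int.ofStr? s).getD 0

-- ===== PORT A =====
def scramble_sorted (items : List String) : List String :=
  let st := (PySem.List.enumerate items).foldl
    (fun (st : List Int × List String × List Bool) p =>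
      if pyLastDigit p.2 then
        (st.1 ++ [pyParseInt p.2], st.2.1, PySem.List.pySetD st.2.2 p.1 true)
      else
        (st.1, st.2.1 ++ [p.2], st.2.2))
    ([], [], List.replicate items.length false)
  let numbers := PySem.List.sorted st.1 (fun x => x) false
  let words := PySem.List.sorted st.2.1 (fun w => PySem.Str.lower w) false
  let fin := (PySem.List.pyRange 0 (PySem.List.len items) 1).foldl
    (fun (acc : List String × Int × Int) idx =>
      if PySem.List.pyGetD st.2.2 idx false then
        (acc.1 ++ [PySem.Int.toStr (PySem.List.pyGetD numbers acc.2.1 0)], acc.2.1 + 1, acc.2.2)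
      else
        (acc.1 ++ [PySem.List.pyGetD words acc.2.2 ""], acc.2.1, acc.2.2 + 1))
    ([], 0, 0)
  fin.1

-- ===== PORT B =====
-- the Python value `keys[j]` is an int for numeric slots and a lowercased string for word slots
def pvKeyLt : (Int ⊕ String) → (Int ⊕ String) → Bool
  | .inl a, .inl b => decide (a < b)
  | .inr a, .inr b => decide (a < b)
  | _, _ => false          -- cross-kind comparison: guarded off in B by `numeric[m] == numeric[j]`

def scramble_sorted_alt (items : List String) : List String :=
  let n := items.length
  let numeric := items.map pyLastDigit
  let keys : List (Int ⊕ String) := (numeric.zip items).map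
    (fun p => if p.1 then .inl (pyParseInt p.2) else .inr (PySem.Str.lower p.2))
  let ranks := (List.range n).map (fun j =>
    (List.range n).foldl (fun (r : Nat) m =>
      if (numeric.getD m false == numeric.getD j false)
         && (pvKeyLt (keys.getD m (.inl 0)) (keys.getD j (.inl 0))
             || ((keys.getD m (.inl 0) == keys.getD j (.inl 0)) && decide (m < j)))
      then r + 1 else r) 0)
  let fin := items.foldl
    (fun (acc : List String × Nat × Nat) s =>
      let t := pyLastDigit s
      let r := if t then acc.2.1 else acc.2.2
      let out :=
        match (List.range n).find? (fun j => (numeric.getD j false == t) && (ranks.getD j 0 == r)) with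
        | some j => acc.1 ++ [if t then (match keys.getD j (.inl 0) with
                                         | .inl v => PySem.Int.toStr v
                                         | .inr w => w)
                              else items.getD j ""]
        | none => acc.1      -- Python's inner loop falling through without a break: cannot happen (ranks are onto)
      (out, if t then acc.2.1 + 1 else acc.2.1, if t then acc.2.2 else acc.2.2 + 1))
    ([], 0, 0)
  fin.1

-- ===== PRECONDITION & SPEC =====
-- Pre_ excludes exactly the inputs where Python A raises: an empty-string item (IndexError on item[-1])
-- and a digit-ending item that int() rejects (ValueError); Python B raises on exactly the same inputs.
def Pre_scramble_sorted (items : List String) : Prop :=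
  ∀ s ∈ items, s.toList ≠ [] ∧ (pyLastDigit s = true → (PySem.Int.ofStr? s).isSome = true)
instance (items : List String) : Decidable (Pre_scramble_sorted items) := by
  unfold Pre_scramble_sorted; infer_instance
def pvWitness_scramble_sorted : List String := ["10", "banana", "2", "Apple"]
def Spec_scramble_sorted (items : List String) (out : List String) : Prop := out = scramble_sorted_alt items
instance (items : List String) (out : List String) : Decidable (Spec_scramble_sorted items out) := by unfold Spec_scramble_sorted; infer_instance

-- ===== CLAIM (what is proved, stated in full; the proofs are below) =====
def Claim_equal_scramble_sorted : Prop := ∀ (items : List String), Dom_scramble_sorted items → Pre_scramble_sorted items → Spec_scramble_sorted items (scramble_sorted items)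

-- ===== LEMMAS AND PROOFS =====

-- abbreviations for the proofs (never used by the ports / claim)
def pvFlags (items : List String) : List Bool := items.map pyLastDigit
def pvP (items : List String) (k : Nat) : Bool := (pvFlags items).getD k false
def pvCntT (items : List String) (q : Nat) : Nat := (List.range q).countP (pvP items)
def pvCntF (items : List String) (q : Nat) : Nat := (List.range q).countP (fun k => !pvP items k)
def pvNs (items : List String) : List Int :=
  PySem.List.sorted ((items.filter pyLastDigit).map pyParseInt) (fun x => x) false
def pvWs (items : List String) : List String :=
  PySem.List.sorted (items.filter (fun s => !pyLastDigit s)) (fun w => PySem.Str.lower w) false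
def pvG (items : List String) (q : Nat) : String :=
  if pvP items q then PySem.Int.toStr ((pvNs items).getD (pvCntT items q) 0)
  else (pvWs items).getD (pvCntF items q) ""

theorem pv_map_getD_range {α : Type} (l : List α) (d : α) :
    (List.range l.length).map (fun k => l.getD k d) = l := by
  apply List.ext_getElem
  · simp
  · intro i h1 h2
    simp [List.getD_eq_getElem?_getD, List.getElem?_eq_getElem h2]

theorem pv_A_fold1 (suf : List String) :
    ∀ (pre : List Bool) (ns0 : List Int) (ws0 : List String),
    (PySem.List.enumerate suf (pre.length : Int)).foldl
      (fun (st : List Int × List String × List Bool) p =>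
        if pyLastDigit p.2 then
          (st.1 ++ [pyParseInt p.2], st.2.1, PySem.List.pySetD st.2.2 p.1 true)
        else
          (st.1, st.2.1 ++ [p.2], st.2.2))
      (ns0, ws0, pre ++ List.replicate suf.length false)
    = (ns0 ++ (suf.filter pyLastDigit).map pyParseInt,
       ws0 ++ suf.filter (fun s => !pyLastDigit s),
       pre ++ suf.map pyLastDigit) := by
  induction suf with
  | nil => intro pre ns0 ws0; simp [PySem.List.enumerate_nil]
  | cons x xs ih =>
    intro pre ns0 ws0
    rw [PySem.List.enumerate_cons, List.foldl_cons]
    by_cases hx : pyLastDigit x = true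
    · have h3 : PySem.List.pySetD (pre ++ List.replicate (x :: xs).length false) (pre.length : Int) true
          = (pre ++ [true]) ++ List.replicate xs.length false := by
        simp [List.replicate_succ]
      simp only [hx, if_pos, h3]
      have hs : ((pre.length : Int) + 1) = (((pre ++ [true]).length : Nat) : Int) := by
        simp
      rw [hs, ih (pre ++ [true]) (ns0 ++ [pyParseInt x]) ws0]
      simp [hx]
    · have hx' : pyLastDigit x = false := by simpa using hx
      have h2 : (pre ++ List.replicate (x :: xs).length false)
          = (pre ++ [false]) ++ List.replicate xs.length false := by
        simp [List.replicate_succ]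
      simp only [hx', if_neg, Bool.false_eq_true, not_false_iff, h2]
      have hs : ((pre.length : Int) + 1) = (((pre ++ [false]).length : Nat) : Int) := by
        simp
      rw [hs, ih (pre ++ [false]) ns0 (ws0 ++ [x])]
      simp [hx']

theorem pv_A_fold2 (flags : List Bool) (ns : List Int) (ws : List String) (m : Nat) :
    (PySem.List.pyRange 0 (m : Int) 1).foldl
      (fun (acc : List String × Int × Int) idx =>
        if PySem.List.pyGetD flags idx false then
          (acc.1 ++ [PySem.Int.toStr (PySem.List.pyGetD ns acc.2.1 0)], acc.2.1 + 1, acc.2.2)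
        else
          (acc.1 ++ [PySem.List.pyGetD ws acc.2.2 ""], acc.2.1, acc.2.2 + 1))
      ([], 0, 0)
    = ((List.range m).map (fun q =>
          if flags.getD q false then
            PySem.Int.toStr (ns.getD ((List.range q).countP (fun k => flags.getD k false)) 0)
          else ws.getD ((List.range q).countP (fun k => !flags.getD k false)) ""),
       ((List.range m).countP (fun k => flags.getD k false) : Int),
       ((List.range m).countP (fun k => !flags.getD k false) : Int)) := by
  induction m with
  | zero => simp [PySem.List.pyRange_one_eq_nil]
  | succ m ih =>
    have hr : PySem.List.pyRange 0 ((m + 1 : Nat) : Int) 1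
        = PySem.List.pyRange 0 (m : Int) 1 ++ [(m : Int)] := by
      have := PySem.List.pyRange_one_succ_right (a := 0) (b := (m : Int)) (by positivity)
      push_cast
      rw [← this]
    rw [hr, List.foldl_append, ih]
    by_cases hm : flags.getD m false = true
    · simp only [List.getD_eq_getElem?_getD] at hm
      simp [List.range_succ, List.countP_append, hm]
    · have hm' : flags.getD m false = false := by simpa using hm
      simp only [List.getD_eq_getElem?_getD] at hm'
      simp [List.range_succ, List.countP_append, hm']

theorem pv_A_eq (items : List String) :
    scramble_sorted items = (List.range items.length).map (pvG items) := by
  have hA1 := pv_A_fold1 items [] [] []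
  simp only [List.length_nil, Nat.cast_zero, List.nil_append] at hA1
  simp only [scramble_sorted, PySem.List.len_eq]
  rw [hA1]
  dsimp only
  rw [pv_A_fold2 (items.map pyLastDigit)
        (PySem.List.sorted ((items.filter pyLastDigit).map pyParseInt) (fun x => x) false)
        (PySem.List.sorted (items.filter (fun s => !pyLastDigit s)) (fun w => PySem.Str.lower w) false)
        items.length]
  unfold pvG pvP pvCntT pvCntF pvNs pvWs
  rfl

def pvSrank {α κ : Type} [LinearOrder κ] (key : α → κ) (ys : List α) (x : α) (p : Nat) : Nat :=
  ys.countP (fun o => decide (key o < key x)) + (ys.take p).countP (fun o => decide (key o = key x))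

theorem pv_countP_le_split {α κ : Type} [LinearOrder κ] (key : α → κ) (c : κ) (l : List α) :
    l.countP (fun o => decide (key o ≤ c))
    = l.countP (fun o => decide (key o < c)) + l.countP (fun o => decide (key o = c)) := by
  induction l with
  | nil => rfl
  | cons a l ih =>
    simp only [List.countP_cons, ih]
    rcases lt_trichotomy (key a) c with h | h | h
    · simp [h, h.le, ne_of_lt h]; omega
    · simp [h]; omega
    · simp [not_le.mpr h, not_lt.mpr h.le, ne_of_gt h]

theorem pv_insertBy_splice {α κ : Type} [LinearOrder κ] (key : α → κ) (x : α) :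
    ∀ (l : List α), l.Pairwise (fun a b => key a ≤ key b) →
    PySem.List.insertBy (fun a b => decide (key a < key b)) x l
    = l.take (l.countP (fun y => decide (key y ≤ key x)))
      ++ x :: l.drop (l.countP (fun y => decide (key y ≤ key x))) := by
  intro l
  induction l with
  | nil => intro _; rfl
  | cons y ys ih =>
    intro hp
    rw [List.pairwise_cons] at hp
    by_cases h : key x < key y
    · have h0 : ys.countP (fun z => decide (key z ≤ key x)) = 0 := by
        rw [List.countP_eq_zero]
        intro z hz
        simp only [decide_eq_true_eq]
        exact not_le.mpr (lt_of_lt_of_le h (hp.1 z hz))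
      simp [PySem.List.insertBy, List.countP_cons, h, not_le.mpr h, h0]
    · have hyx : key y ≤ key x := not_lt.mp h
      simp only [PySem.List.insertBy, List.countP_cons]
      rw [if_neg (by simp [h])]
      rw [ih hp.2]
      simp [hyx, List.take_succ_cons, List.drop_succ_cons, Nat.one_add]

theorem pv_splice_get_lt {α : Type} (L : List α) (x : α) (c i : Nat) (hi : i < c) (hc : c ≤ L.length) :
    (L.take c ++ x :: L.drop c)[i]? = L[i]? := by
  rw [List.getElem?_append_left (by rw [List.length_take]; omega)]
  exact List.getElem?_take_of_lt hi

theorem pv_splice_get_eq {α : Type} (L : List α) (x : α) (c : Nat) (hc : c ≤ L.length) :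
    (L.take c ++ x :: L.drop c)[c]? = some x := by
  rw [List.getElem?_append_right (by simp)]
  simp [Nat.min_eq_left hc]

theorem pv_splice_get_gt {α : Type} (L : List α) (x : α) (c i : Nat) (hi : c ≤ i) (hc : c ≤ L.length) :
    (L.take c ++ x :: L.drop c)[i + 1]? = L[i]? := by
  rw [List.getElem?_append_right (by simp; omega)]
  have h2 : i + 1 - (L.take c).length = (i - c) + 1 := by
    simp [Nat.min_eq_left hc]; omega
  rw [h2]
  simp only [List.getElem?_cons_succ]
  rw [List.getElem?_drop]
  congr 1; omega

theorem pv_sorted_snoc {α κ : Type} [LinearOrder κ] (key : α → κ) (ys : List α) (x : α) :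
    PySem.List.sorted (ys ++ [x]) key false
    = PySem.List.insertBy (fun a b => decide (key a < key b)) x (PySem.List.sorted ys key false) := by
  rw [PySem.List.sorted_eq_foldl_insertBy, PySem.List.sorted_eq_foldl_insertBy, List.foldl_append]
  rfl

theorem pv_countP_sorted {α κ : Type} [LinearOrder κ] (key : α → κ) (ys : List α) (p : α → Bool) :
    (PySem.List.sorted ys key false).countP p = ys.countP p :=
  (PySem.List.sorted_perm ys key false).countP_eq p

theorem pv_srank_get {α κ : Type} [LinearOrder κ] (key : α → κ) (d : α) :
    ∀ (ys : List α) (p : Nat), p < ys.length →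
    (PySem.List.sorted ys key false)[pvSrank key ys (ys.getD p d) p]? = ys[p]? := by
  intro ys
  induction ys using List.reverseRecOn with
  | nil => intro p hp; simp at hp
  | append_singleton ys x ih =>
    intro p hp
    rw [pv_sorted_snoc,
        pv_insertBy_splice key x _ (PySem.List.sorted_pairwise ys key)]
    have hlen : (PySem.List.sorted ys key false).length = ys.length := PySem.List.length_sorted _ _ _
    have hcys : (PySem.List.sorted ys key false).countP (fun y => decide (key y ≤ key x))
        = ys.countP (fun y => decide (key y ≤ key x)) := pv_countP_sorted key ys _
    have hcle : (PySem.List.sorted ys key false).countP (fun y => decide (key y ≤ key x))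
        ≤ (PySem.List.sorted ys key false).length := List.countP_le_length
    by_cases hpy : p < ys.length
    · -- old element
      have hget : (ys ++ [x]).getD p d = ys.getD p d := by
        rw [List.getD_eq_getElem?_getD, List.getD_eq_getElem?_getD,
            List.getElem?_append_left hpy]
      have hgecur : (ys ++ [x])[p]? = ys[p]? := List.getElem?_append_left hpy
      have hemem : ys[p]? = some (ys.getD p d) := by
        rw [List.getD_eq_getElem?_getD, List.getElem?_eq_getElem hpy]; rfl
      have htake : (ys ++ [x]).take p = ys.take p := List.take_append_of_le_length (le_of_lt hpy)
      have hr := ih p hpy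
      have hrlen : pvSrank key ys (ys.getD p d) p < (PySem.List.sorted ys key false).length :=
        (List.getElem?_eq_some_iff.mp (hr.trans hemem)).1
      have hdropc : ys.drop p = ys.getD p d :: ys.drop (p + 1) := by
        rw [List.getD_eq_getElem _ _ hpy]
        exact List.drop_eq_getElem_cons hpy
      have hcsplit : ys.countP (fun o => decide (key o = key (ys.getD p d)))
          = (ys.take p).countP (fun o => decide (key o = key (ys.getD p d)))
            + (ys.drop p).countP (fun o => decide (key o = key (ys.getD p d))) := by
        have h := (List.countP_append (l₁ := ys.take p) (l₂ := ys.drop p)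
          (p := fun o => decide (key o = key (ys.getD p d))))
        rw [List.take_append_drop] at h
        exact h
      have hdropone : 1 ≤ (ys.drop p).countP (fun o => decide (key o = key (ys.getD p d))) := by
        rw [hdropc, List.countP_cons]
        simp
      by_cases hx : key x < key (ys.getD p d)
      · -- the new element is strictly smaller: rank shifts by one
        have hrank : pvSrank key (ys ++ [x]) ((ys ++ [x]).getD p d) p
            = pvSrank key ys (ys.getD p d) p + 1 := by
          rw [hget]
          unfold pvSrank
          rw [List.countP_append, htake]
          simp [pvSrank, List.getD_eq_getElem?_getD]
          have hx2 : key x < key (ys[p]?.getD d) := by rw [hemem]; exact hx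
          rw [if_pos hx2]
          omega
        have hcr : (PySem.List.sorted ys key false).countP (fun y => decide (key y ≤ key x))
            ≤ pvSrank key ys (ys.getD p d) p := by
          have h1 : ys.countP (fun y => decide (key y ≤ key x))
              ≤ ys.countP (fun o => decide (key o < key (ys.getD p d))) := by
            apply List.countP_mono_left
            intro a _ ha
            simp only [decide_eq_true_eq] at ha ⊢
            exact lt_of_le_of_lt ha hx
          calc _ = _ := hcys
            _ ≤ _ := h1
            _ ≤ _ := Nat.le_add_right _ _
        rw [hrank, pv_splice_get_gt _ x _ _ hcr hcle, hgecur]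
        exact hr
      · -- key (ys.getD p d) ≤ key x: rank unchanged
        have hex : key (ys.getD p d) ≤ key x := not_lt.mp hx
        have hrank : pvSrank key (ys ++ [x]) ((ys ++ [x]).getD p d) p
            = pvSrank key ys (ys.getD p d) p := by
          rw [hget]
          unfold pvSrank
          rw [List.countP_append, htake]
          simp [pvSrank, List.getD_eq_getElem?_getD]
          have hex2 : key (ys[p]?.getD d) ≤ key x := by rw [hemem]; exact hex
          exact hex2
        have hrc : pvSrank key ys (ys.getD p d) p
            < (PySem.List.sorted ys key false).countP (fun y => decide (key y ≤ key x)) := by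
          rw [hcys, pv_countP_le_split key (key x) ys]
          unfold pvSrank
          by_cases heq : key (ys.getD p d) = key x
          · have h1 : ys.countP (fun o => decide (key o < key (ys.getD p d)))
                = ys.countP (fun o => decide (key o < key x)) := by
              apply List.countP_congr; intro a _; rw [heq]
            have h2 : ys.countP (fun o => decide (key o = key (ys.getD p d)))
                = ys.countP (fun o => decide (key o = key x)) := by
              apply List.countP_congr; intro a _; rw [heq]
            omega
          · have hlt : key (ys.getD p d) < key x := lt_of_le_of_ne hex heq
            have h4 : ys.countP (fun o => decide (key o ≤ key (ys.getD p d)))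
                ≤ ys.countP (fun o => decide (key o < key x)) := by
              apply List.countP_mono_left
              intro a _ ha
              simp only [decide_eq_true_eq] at ha ⊢
              exact lt_of_le_of_lt ha hlt
            have h5 := pv_countP_le_split key (key (ys.getD p d)) ys
            omega
        rw [hrank, pv_splice_get_lt _ x _ _ hrc hcle, hgecur]
        exact hr
    · -- the new element x itself
      have hpe : p = ys.length := by
        rw [List.length_append, List.length_singleton] at hp; omega
      subst hpe
      have hget : (ys ++ [x]).getD ys.length d = x := by
        rw [List.getD_eq_getElem?_getD]
        simp
      have hrank : pvSrank key (ys ++ [x]) ((ys ++ [x]).getD ys.length d) ys.length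
          = (PySem.List.sorted ys key false).countP (fun y => decide (key y ≤ key x)) := by
        rw [hget]
        unfold pvSrank
        rw [List.countP_append, List.take_append_of_le_length (le_refl _), List.take_length]
        simp [hcys, pv_countP_le_split key (key x) ys]
      rw [hrank, pv_splice_get_eq _ x _ hcle, List.getElem?_concat_length]

theorem pv_srank_lt {α κ : Type} [LinearOrder κ] (key : α → κ) (d : α) (ys : List α) (p : Nat)
    (hp : p < ys.length) : pvSrank key ys (ys.getD p d) p < ys.length := by
  have h := pv_srank_get key d ys p hp
  have hmem : ys[p]? = some (ys.getD p d) := by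
    rw [List.getD_eq_getElem?_getD, List.getElem?_eq_getElem hp]; rfl
  have := (List.getElem?_eq_some_iff.mp (h.trans hmem)).1
  rwa [PySem.List.length_sorted] at this

theorem pv_take_cnt_lt {α κ : Type} [LinearOrder κ] (key : α → κ) (d : α) (ys : List α) (a : Nat)
    (ha : a < ys.length) :
    (ys.take a).countP (fun o => decide (key o = key (ys.getD a d))) + 1
      ≤ ys.countP (fun o => decide (key o = key (ys.getD a d))) := by
  have hsplit : ys.countP (fun o => decide (key o = key (ys.getD a d)))
      = (ys.take a).countP (fun o => decide (key o = key (ys.getD a d)))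
        + (ys.drop a).countP (fun o => decide (key o = key (ys.getD a d))) := by
    have h := (List.countP_append (l₁ := ys.take a) (l₂ := ys.drop a)
      (p := fun o => decide (key o = key (ys.getD a d))))
    rw [List.take_append_drop] at h
    exact h
  have hdropc : ys.drop a = ys.getD a d :: ys.drop (a + 1) := by
    rw [List.getD_eq_getElem _ _ ha]
    exact List.drop_eq_getElem_cons ha
  have h1 : 1 ≤ (ys.drop a).countP (fun o => decide (key o = key (ys.getD a d))) := by
    rw [hdropc, List.countP_cons]
    simp
  omega

theorem pv_srank_mono_key {α κ : Type} [LinearOrder κ] (key : α → κ) (d : α) (ys : List α)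
    (a b : Nat) (ha : a < ys.length) (_hb : b < ys.length)
    (hk : key (ys.getD a d) < key (ys.getD b d)) :
    pvSrank key ys (ys.getD a d) a < pvSrank key ys (ys.getD b d) b := by
  have h1 := pv_take_cnt_lt key d ys a ha
  have h2 := pv_countP_le_split key (key (ys.getD a d)) ys
  have h3 : ys.countP (fun o => decide (key o ≤ key (ys.getD a d)))
      ≤ ys.countP (fun o => decide (key o < key (ys.getD b d))) := by
    apply List.countP_mono_left
    intro o _ ho
    simp only [decide_eq_true_eq] at ho ⊢
    exact lt_of_le_of_lt ho hk
  have h4 : (ys.take a).countP (fun o => decide (key o = key (ys.getD a d)))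
      ≤ ys.countP (fun o => decide (key o = key (ys.getD a d))) := by omega
  unfold pvSrank
  omega

theorem pv_srank_mono_pos {α κ : Type} [LinearOrder κ] (key : α → κ) (d : α) (ys : List α)
    (a b : Nat) (hab : a < b) (hb : b < ys.length)
    (hk : key (ys.getD a d) = key (ys.getD b d)) :
    pvSrank key ys (ys.getD a d) a < pvSrank key ys (ys.getD b d) b := by
  have ha : a < ys.length := lt_trans hab hb
  have hc1 : ys.countP (fun o => decide (key o < key (ys.getD a d)))
      = ys.countP (fun o => decide (key o < key (ys.getD b d))) := by
    apply List.countP_congr; intro o _; rw [hk]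
  have hc2 : (ys.take a).countP (fun o => decide (key o = key (ys.getD a d)))
      = (ys.take a).countP (fun o => decide (key o = key (ys.getD b d))) := by
    apply List.countP_congr; intro o _; rw [hk]
  have htb : ys.take b = ys.take (a+1) ++ (ys.take b).drop (a+1) := by
    conv_lhs => rw [← List.take_append_drop (a+1) (ys.take b)]
    rw [List.take_take]
    congr 2
    omega
  have hta : (ys.take (a+1)).countP (fun o => decide (key o = key (ys.getD b d)))
      = (ys.take a).countP (fun o => decide (key o = key (ys.getD b d))) + 1 := by
    have e1 : key (ys.getD a d) = key (ys.getD b d) := hk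
    rw [List.getD_eq_getElem _ _ ha, List.getD_eq_getElem _ _ hb] at e1
    rw [List.take_succ, List.countP_append, List.getElem?_eq_getElem ha]
    have e2 : key ys[a] = key (ys[b]?.getD d) := by
      rw [List.getElem?_eq_getElem hb]
      exact e1
    simp [e2]
  have hm : (ys.take (a+1)).countP (fun o => decide (key o = key (ys.getD b d)))
      ≤ (ys.take b).countP (fun o => decide (key o = key (ys.getD b d))) := by
    conv_rhs => rw [htb]
    rw [List.countP_append]
    omega
  unfold pvSrank
  omega

theorem pv_srank_inj {α κ : Type} [LinearOrder κ] (key : α → κ) (d : α) (ys : List α)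
    (a b : Nat) (hab : a < b) (hb : b < ys.length) :
    pvSrank key ys (ys.getD a d) a ≠ pvSrank key ys (ys.getD b d) b := by
  have ha : a < ys.length := lt_trans hab hb
  rcases lt_trichotomy (key (ys.getD a d)) (key (ys.getD b d)) with h | h | h
  · exact Nat.ne_of_lt (pv_srank_mono_key key d ys a b ha hb h)
  · exact Nat.ne_of_lt (pv_srank_mono_pos key d ys a b hab hb h)
  · exact (Nat.ne_of_lt (pv_srank_mono_key key d ys b a hb ha h)).symm

theorem pv_srank_surj {α κ : Type} [LinearOrder κ] (key : α → κ) (d : α) (ys : List α)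
    (r : Nat) (hr : r < ys.length) :
    ∃ p, p < ys.length ∧ pvSrank key ys (ys.getD p d) p = r := by
  set f := fun p => pvSrank key ys (ys.getD p d) p with hf
  have hnd : ((List.range ys.length).map f).Nodup := by
    rw [List.Nodup, List.pairwise_map, List.pairwise_iff_getElem]
    intro i j hi hj hij
    simp only [List.getElem_range]
    rw [List.length_range] at hi hj
    exact pv_srank_inj key d ys i j hij hj
  have hlen : ((List.range ys.length).map f).length = ys.length := by simp
  have hsub : ∀ x ∈ (List.range ys.length).map f, x < ys.length := by
    intro x hx
    rcases List.mem_map.mp hx with ⟨p, hp, rfl⟩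
    exact pv_srank_lt key d ys p (List.mem_range.mp hp)
  have hfin : ((List.range ys.length).map f).toFinset = Finset.range ys.length := by
    apply Finset.eq_of_subset_of_card_le
    · intro x hx
      rw [List.mem_toFinset] at hx
      exact Finset.mem_range.mpr (hsub x hx)
    · rw [List.toFinset_card_of_nodup hnd, hlen, Finset.card_range]
  have hrmem : r ∈ (List.range ys.length).map f := by
    rw [← List.mem_toFinset, hfin]
    exact Finset.mem_range.mpr hr
  rcases List.mem_map.mp hrmem with ⟨p, hp, hfp⟩
  exact ⟨p, List.mem_range.mp hp, hfp⟩

theorem pv_insertBy_map {α κ : Type} [LinearOrder κ] (f : α → κ) (x : α) :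
    ∀ (m : List α),
    PySem.List.insertBy (fun a b => decide (a < b)) (f x) (m.map f)
    = (PySem.List.insertBy (fun a b => decide (f a < f b)) x m).map f := by
  intro m
  induction m with
  | nil => rfl
  | cons y ys ih =>
    by_cases h : f x < f y
    · simp [PySem.List.insertBy, h]
    · simp [PySem.List.insertBy, h, ih]

theorem pv_sorted_map {α κ : Type} [LinearOrder κ] (f : α → κ) (l : List α) :
    PySem.List.sorted (l.map f) (fun x => x) false
    = (PySem.List.sorted l f false).map f := by
  rw [PySem.List.sorted_eq_foldl_insertBy, PySem.List.sorted_eq_foldl_insertBy, List.foldl_map]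
  suffices h : ∀ (acc : List α),
      l.foldl (fun acc x => PySem.List.insertBy (fun a b => decide (a < b)) (f x) acc) (acc.map f)
      = (l.foldl (fun acc x => PySem.List.insertBy (fun a b => decide (f a < f b)) x acc) acc).map f by
    simpa using h []
  induction l with
  | nil => intro acc; rfl
  | cons y ys ih =>
    intro acc
    simp only [List.foldl_cons]
    rw [pv_insertBy_map f y acc, ih]

theorem pv_range_map_getD_take {α : Type} (l : List α) (d : α) (j : Nat) (hj : j ≤ l.length) :
    (List.range j).map (fun k => l.getD k d) = l.take j := by
  apply List.ext_getElem
  · simp; omega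
  · intro i h1 h2
    simp only [List.getElem_map, List.getElem_range, List.getElem_take]
    rw [List.getD_eq_getElem _ _ (by simp at h1; omega)]

theorem pv_countP_range_getD {α : Type} (l : List α) (d : α) (p : α → Bool) :
    (List.range l.length).countP (fun m => p (l.getD m d)) = l.countP p := by
  have h := congrArg (List.countP p) (pv_map_getD_range l d)
  rw [List.countP_map] at h
  exact h

theorem pv_countP_range_lt {g : Nat → Bool} (n j : Nat) (hj : j ≤ n) :
    (List.range n).countP (fun m => decide (m < j) && g m)
    = (List.range j).countP g := by
  have hsplit : List.range n = List.range j ++ (List.range (n - j)).map (j + ·) := by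
    rw [← List.range_add]
    congr 1
    omega
  rw [hsplit, List.countP_append]
  have h0 : ((List.range (n - j)).map (j + ·)).countP (fun m => decide (m < j) && g m) = 0 := by
    rw [List.countP_eq_zero]
    intro x hx
    rcases List.mem_map.mp hx with ⟨i, _, rfl⟩
    simp
  have h1 : (List.range j).countP (fun m => decide (m < j) && g m) = (List.range j).countP g := by
    apply List.countP_congr
    intro m hm
    simp [List.mem_range.mp hm]
  rw [h0, h1]
  omega

theorem pv_countP_or_disjoint {α : Type} (p q : α → Bool) :
    ∀ (l : List α), (∀ x ∈ l, ¬(p x = true ∧ q x = true)) →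
    l.countP (fun x => p x || q x) = l.countP p + l.countP q := by
  intro l
  induction l with
  | nil => intro _; rfl
  | cons a l ih =>
    intro h
    have ha := h a (List.mem_cons_self)
    simp only [List.countP_cons]
    rw [ih (fun x hx => h x (List.mem_cons_of_mem _ hx))]
    by_cases hp : p a = true
    · have hq : q a = false := by
        cases hqv : q a with
        | false => rfl
        | true => exact absurd ⟨hp, hqv⟩ ha
      simp [hp, hq]; omega
    · simp only [Bool.not_eq_true] at hp
      simp [hp]; omega

theorem pv_filter_getElem_cnt {α : Type} (p : α → Bool) :
    ∀ (l : List α) (j : Nat), (hj : j < l.length) → p l[j] = true →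
    (l.filter p)[(l.take j).countP p]? = some l[j] := by
  intro l
  induction l with
  | nil => intro j hj; simp at hj
  | cons a l ih =>
    intro j hj hp
    cases j with
    | zero =>
      simp only [List.getElem_cons_zero] at hp ⊢
      simp [List.filter_cons, hp]
    | succ k =>
      simp only [List.getElem_cons_succ] at hp ⊢
      have hk : k < l.length := by simpa using hj
      rw [List.take_succ_cons, List.countP_cons, List.filter_cons]
      by_cases hpa : p a = true
      · simp only [hpa, if_pos]
        rw [List.getElem?_cons_succ]
        exact ih k hk hp
      · simp only [Bool.not_eq_true] at hpa
        simp only [hpa]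
        rw [if_neg (by simp)]
        simpa using ih k hk hp

theorem pv_filter_take {α : Type} (p : α → Bool) :
    ∀ (l : List α) (j : Nat),
    (l.take j).filter p = (l.filter p).take ((l.take j).countP p) := by
  intro l
  induction l with
  | nil => intro j; simp
  | cons a l ih =>
    intro j
    cases j with
    | zero => simp
    | succ k =>
      rw [List.take_succ_cons, List.filter_cons, List.filter_cons, List.countP_cons]
      by_cases hpa : p a = true
      · simp [hpa, ih k]
      · simp only [Bool.not_eq_true] at hpa
        simp [hpa, ih k]


-- B-side proof abbreviations
def pvKeyOfFn (s : String) : Int ⊕ String :=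
  if pyLastDigit s then .inl (pyParseInt s) else .inr (PySem.Str.lower s)

def pvCond (items : List String) (j m : Nat) : Bool :=
  ((items.map pyLastDigit).getD m false == (items.map pyLastDigit).getD j false)
  && (pvKeyLt ((items.map pvKeyOfFn).getD m (.inl 0)) ((items.map pvKeyOfFn).getD j (.inl 0))
      || (((items.map pvKeyOfFn).getD m (.inl 0) == (items.map pvKeyOfFn).getD j (.inl 0))
          && decide (m < j)))

def pvRank (items : List String) (j : Nat) : Nat :=
  (List.range items.length).countP (pvCond items j)

def pvVal (items : List String) (t : Bool) (j : Nat) : String :=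
  if t then PySem.Int.toStr (pyParseInt (items.getD j "")) else items.getD j ""

def pvFind (items : List String) (t : Bool) (r : Nat) : Option Nat :=
  (List.range items.length).find? (fun j => (pvP items j == t) && (pvRank items j == r))

def pvChunk (items : List String) (t : Bool) (r : Nat) : List String :=
  match pvFind items t r with
  | some j => [pvVal items t j]
  | none => []

theorem pv_find?_congr {α : Type} (p q : α → Bool) :
    ∀ (l : List α), (∀ x ∈ l, p x = q x) → l.find? p = l.find? q := by
  intro l
  induction l with
  | nil => intro _; rfl
  | cons a l ih =>
    intro h
    rw [List.find?_cons, List.find?_cons, h a (List.mem_cons_self),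
        ih (fun x hx => h x (List.mem_cons_of_mem _ hx))]

theorem pv_foldl_count_nat {α : Type} (p : α → Bool) :
    ∀ (l : List α) (a : Nat),
    l.foldl (fun acc x => if p x then acc + 1 else acc) a = a + l.countP p := by
  intro l
  induction l with
  | nil => intro a; simp
  | cons x l ih =>
    intro a
    rw [List.foldl_cons, List.countP_cons]
    by_cases h : p x <;> simp [h, ih] <;> omega

theorem pv_keys_eq (items : List String) :
    ((items.map pyLastDigit).zip items).map
      (fun p => if p.1 then (.inl (pyParseInt p.2) : Int ⊕ String) else .inr (PySem.Str.lower p.2))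
    = items.map pvKeyOfFn := by
  have h : ∀ (l : List String), (l.map pyLastDigit).zip l = l.map (fun s => (pyLastDigit s, s)) := by
    intro l
    induction l with
    | nil => rfl
    | cons a l ih => simp [ih]
  rw [h items, List.map_map]
  rfl

theorem pv_B_fold2 (flags : List Bool) (g : Bool → Nat → List String) (m : Nat) :
    ((List.range m).foldl
      (fun (acc : List String × Nat × Nat) q =>
        (acc.1 ++ g (flags.getD q false) (if flags.getD q false then acc.2.1 else acc.2.2),
         if flags.getD q false then acc.2.1 + 1 else acc.2.1,
         if flags.getD q false then acc.2.2 else acc.2.2 + 1)) ([], 0, 0))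
    = ((List.range m).flatMap (fun q =>
          g (flags.getD q false)
            (if flags.getD q false then (List.range q).countP (fun k => flags.getD k false)
             else (List.range q).countP (fun k => !flags.getD k false))),
       (List.range m).countP (fun k => flags.getD k false),
       (List.range m).countP (fun k => !flags.getD k false)) := by
  induction m with
  | zero => simp
  | succ m ih =>
    rw [List.range_succ, List.foldl_append, ih, List.flatMap_append, List.countP_append,
        List.countP_append]
    by_cases hm : flags.getD m false = true
    · have hm2 : flags[m]?.getD false = true := by
        simpa [List.getD_eq_getElem?_getD] using hm
      simp [hm2]
    · have hm2 : flags[m]?.getD false = false := by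
        have := hm
        simp [List.getD_eq_getElem?_getD] at this
        simpa using this
      simp [hm2]

def pvStep (items : List String) (acc : List String × Nat × Nat) (t : Bool) :
    List String × Nat × Nat :=
  (acc.1 ++ pvChunk items t (if t then acc.2.1 else acc.2.2),
   if t then acc.2.1 + 1 else acc.2.1,
   if t then acc.2.2 else acc.2.2 + 1)

theorem pv_getD_map {α β : Type} (f : α → β) (l : List α) (j : Nat) (d : β) (d0 : α)
    (hj : j < l.length) : (l.map f).getD j d = f (l.getD j d0) := by
  rw [List.getD_eq_getElem _ _ (by simpa using hj), List.getD_eq_getElem _ _ hj]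
  simp

theorem pv_B_fold2' (items : List String) (flags : List Bool) :
    flags.foldl (pvStep items) ([], 0, 0)
    = ((List.range flags.length).flatMap (fun q =>
        pvChunk items (flags.getD q false)
          (if flags.getD q false then (List.range q).countP (fun k => flags.getD k false)
           else (List.range q).countP (fun k => !flags.getD k false))),
       (List.range flags.length).countP (fun k => flags.getD k false),
       (List.range flags.length).countP (fun k => !flags.getD k false)) := by
  conv_lhs => rw [← pv_map_getD_range flags false, List.foldl_map]
  exact pv_B_fold2 flags (fun t r => pvChunk items t r) flags.length

theorem pv_B_eq (items : List String) :
    scramble_sorted_alt items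
    = (List.range items.length).flatMap (fun q =>
        pvChunk items (pvP items q)
          (if pvP items q then pvCntT items q else pvCntF items q)) := by
  have ha : scramble_sorted_alt items
      = (items.foldl (fun acc s => pvStep items acc (pyLastDigit s)) ([], 0, 0)).1 := by
    simp only [scramble_sorted_alt]
    rw [pv_keys_eq items]
    congr 1
    apply PySem.List.foldl_congr_mem
    intro acc s _
    have hfind :
        (List.range items.length).find? (fun j =>
          ((items.map pyLastDigit).getD j false == pyLastDigit s)
          && (((List.range items.length).map (fun j =>
                (List.range items.length).foldl (fun (r : Nat) m =>
                  if ((items.map pyLastDigit).getD m false == (items.map pyLastDigit).getD j false)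
                     && (pvKeyLt ((items.map pvKeyOfFn).getD m (.inl 0)) ((items.map pvKeyOfFn).getD j (.inl 0))
                         || (((items.map pvKeyOfFn).getD m (.inl 0) == (items.map pvKeyOfFn).getD j (.inl 0))
                             && decide (m < j)))
                  then r + 1 else r) 0)).getD j 0
              == (if pyLastDigit s then acc.2.1 else acc.2.2)))
        = pvFind items (pyLastDigit s) (if pyLastDigit s then acc.2.1 else acc.2.2) := by
      apply pv_find?_congr
      intro j hj
      have hjn : j < items.length := List.mem_range.mp hj
      have hrk : ((List.range items.length).map (fun j =>
            (List.range items.length).foldl (fun (r : Nat) m =>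
              if ((items.map pyLastDigit).getD m false == (items.map pyLastDigit).getD j false)
                 && (pvKeyLt ((items.map pvKeyOfFn).getD m (.inl 0)) ((items.map pvKeyOfFn).getD j (.inl 0))
                     || (((items.map pvKeyOfFn).getD m (.inl 0) == (items.map pvKeyOfFn).getD j (.inl 0))
                         && decide (m < j)))
              then r + 1 else r) 0)).getD j 0 = pvRank items j := by
        rw [pv_getD_map _ _ j 0 0 (by simpa using hjn)]
        have hr0 : (List.range items.length).getD j 0 = j := by
          rw [List.getD_eq_getElem _ _ (by simpa using hjn)]
          simp
        rw [hr0]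
        show (List.range items.length).foldl
            (fun (r : Nat) m => if pvCond items j m then r + 1 else r) 0 = pvRank items j
        rw [pv_foldl_count_nat (pvCond items j)]
        simp [pvRank]
      rw [hrk]
      rfl
    rw [hfind]
    show _ = pvStep items acc (pyLastDigit s)
    unfold pvStep pvChunk
    cases hf : pvFind items (pyLastDigit s) (if pyLastDigit s then acc.2.1 else acc.2.2) with
    | none => simp
    | some j =>
      have hjn : j < items.length := List.mem_range.mp (List.mem_of_find?_eq_some hf)
      have hpred := List.find?_some hf
      have hpj : pvP items j = pyLastDigit s := by
        have := (Bool.and_eq_true _ _).mp hpred |>.1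
        simpa using this
      have hkey : (items.map pvKeyOfFn).getD j (.inl 0) = pvKeyOfFn (items.getD j "") := by
        exact pv_getD_map _ _ j _ "" hjn
      have hflag : (items.map pyLastDigit).getD j false = pyLastDigit (items.getD j "") :=
        pv_getD_map _ _ j _ "" hjn
      simp only [hkey]
      cases ht : pyLastDigit s with
      | true =>
        have hdig : pyLastDigit (items.getD j "") = true := by
          rw [← hflag]
          have := hpj; rw [ht] at this
          exact this
        simp only [ht, if_pos, pvVal, pvKeyOfFn, hdig]
      | false =>
        simp [ht, pvVal]
  rw [ha]
  have hb : items.foldl (fun acc s => pvStep items acc (pyLastDigit s)) ([], 0, 0)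
      = (items.map pyLastDigit).foldl (pvStep items) ([], 0, 0) := by
    rw [List.foldl_map]
  rw [hb, pv_B_fold2' items (items.map pyLastDigit)]
  simp only [List.length_map]
  rfl


theorem pv_beq_inl (a b : Int) : ((Sum.inl a : Int ⊕ String) == Sum.inl b) = decide (a = b) := by
  show (if a = b then true else false) = decide (a = b)
  by_cases h : a = b <;> simp [h]

theorem pv_beq_inr (a b : String) : ((Sum.inr a : Int ⊕ String) == Sum.inr b) = decide (a = b) := by
  show (if a = b then true else false) = decide (a = b)
  by_cases h : a = b <;> simp [h]

theorem pv_bool_distrib (a x y z : Bool) :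
    (a && (x || (y && z))) = ((a && x) || (z && (a && y))) := by
  cases a <;> cases x <;> cases y <;> cases z <;> rfl

theorem pv_countP_range_getD_take {α : Type} (l : List α) (d : α) (p : α → Bool) (j : Nat)
    (hj : j ≤ l.length) :
    (List.range j).countP (fun m => p (l.getD m d)) = (l.take j).countP p := by
  have h := congrArg (List.countP p) (pv_range_map_getD_take l d j hj)
  rw [List.countP_map] at h
  exact h

theorem pv_cntT_take (items : List String) (q : Nat) (hq : q ≤ items.length) :
    pvCntT items q = (items.take q).countP pyLastDigit := by
  unfold pvCntT pvP pvFlags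
  rw [pv_countP_range_getD_take (items.map pyLastDigit) false (fun b => b) q (by simpa using hq),
      ← List.map_take, List.countP_map]
  rfl

theorem pv_cntF_take (items : List String) (q : Nat) (hq : q ≤ items.length) :
    pvCntF items q = (items.take q).countP (fun s => !pyLastDigit s) := by
  unfold pvCntF pvP pvFlags
  rw [pv_countP_range_getD_take (items.map pyLastDigit) false (fun b => !b) q (by simpa using hq),
      ← List.map_take, List.countP_map]
  rfl

theorem pv_cnt_lt_filter {α : Type} (p : α → Bool) (l : List α) (d : α) (q : Nat)
    (hq : q < l.length) (hpq : p (l.getD q d) = true) :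
    (l.take q).countP p < (l.filter p).length := by
  rw [← l.countP_eq_length_filter]
  have hsplit : l.countP p = (l.take q).countP p + (l.drop q).countP p := by
    have h := (List.countP_append (l₁ := l.take q) (l₂ := l.drop q) (p := p))
    rw [List.take_append_drop] at h
    exact h
  have hdropc : l.drop q = l.getD q d :: l.drop (q + 1) := by
    rw [List.getD_eq_getElem _ _ hq]
    exact List.drop_eq_getElem_cons hq
  have h1 : 1 ≤ (l.drop q).countP p := by
    rw [hdropc, List.countP_cons]
    have hpq2 : p (l[q]?.getD d) = true := by
      rw [← List.getD_eq_getElem?_getD]; exact hpq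
    simp [hpq2]
  omega

theorem pv_filter_pos_inv (p : String → Bool) :
    ∀ (l : List String) (r : Nat), r < (l.filter p).length →
    ∃ j, j < l.length ∧ p (l.getD j "") = true ∧ (l.take j).countP p = r := by
  intro l
  induction l with
  | nil => intro r hr; simp at hr
  | cons a l ih =>
    intro r hr
    by_cases hpa : p a = true
    · cases r with
      | zero => exact ⟨0, by simp, by simpa using hpa, by simp⟩
      | succ k =>
        have hk : k < (l.filter p).length := by
          rw [List.filter_cons, if_pos hpa] at hr
          simpa using hr
        obtain ⟨j, hj, hpj, hcnt⟩ := ih k hk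
        refine ⟨j + 1, by simpa using hj, by simpa using hpj, ?_⟩
        rw [List.take_succ_cons, List.countP_cons]
        simp [hpa, hcnt]
    · have hpa' : p a = false := by simpa using hpa
      have hr' : r < (l.filter p).length := by
        rw [List.filter_cons, if_neg (by simp [hpa'])] at hr
        exact hr
      obtain ⟨j, hj, hpj, hcnt⟩ := ih r hr'
      refine ⟨j + 1, by simpa using hj, by simpa using hpj, ?_⟩
      rw [List.take_succ_cons, List.countP_cons]
      simp [hpa', hcnt]

theorem pv_cond_char_true (items : List String) (m j : Nat) (hm : m < items.length)
    (hj : j < items.length) (hpj : pyLastDigit (items.getD j "") = true) :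
    pvCond items j m
    = (pyLastDigit (items.getD m "")
       && (decide (pyParseInt (items.getD m "") < pyParseInt (items.getD j ""))
           || (decide (pyParseInt (items.getD m "") = pyParseInt (items.getD j ""))
               && decide (m < j)))) := by
  unfold pvCond
  rw [pv_getD_map pyLastDigit items m false "" hm, pv_getD_map pyLastDigit items j false "" hj,
      pv_getD_map pvKeyOfFn items m _ "" hm, pv_getD_map pvKeyOfFn items j _ "" hj]
  rw [hpj]
  by_cases hm' : pyLastDigit (items.getD m "") = true
  · rw [hm']
    unfold pvKeyOfFn
    rw [if_pos hm', if_pos hpj]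
    rw [pv_beq_inl]
    rfl
  · have hm'' : pyLastDigit (items.getD m "") = false := by simpa using hm'
    rw [hm'']
    rfl

theorem pv_cond_char_false (items : List String) (m j : Nat) (hm : m < items.length)
    (hj : j < items.length) (hpj : (!pyLastDigit (items.getD j "")) = true) :
    pvCond items j m
    = ((!pyLastDigit (items.getD m ""))
       && (decide (PySem.Str.lower (items.getD m "") < PySem.Str.lower (items.getD j ""))
           || (decide (PySem.Str.lower (items.getD m "") = PySem.Str.lower (items.getD j ""))
               && decide (m < j)))) := by
  have hpj' : pyLastDigit (items.getD j "") = false := by simpa using hpj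
  unfold pvCond
  rw [pv_getD_map pyLastDigit items m false "" hm, pv_getD_map pyLastDigit items j false "" hj,
      pv_getD_map pvKeyOfFn items m _ "" hm, pv_getD_map pvKeyOfFn items j _ "" hj]
  rw [hpj']
  by_cases hm' : pyLastDigit (items.getD m "") = true
  · rw [hm']
    rfl
  · have hm'' : pyLastDigit (items.getD m "") = false := by simpa using hm'
    rw [hm'']
    unfold pvKeyOfFn
    rw [if_neg hm', if_neg (by rw [hpj']; simp)]
    rw [pv_beq_inr]
    rfl

theorem pv_rank_srank {κT : Type} [LinearOrder κT] (items : List String)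
    (p : String → Bool) (key : String → κT)
    (hcond : ∀ m j, m < items.length → j < items.length → p (items.getD j "") = true →
      pvCond items j m
      = (p (items.getD m "")
         && (decide (key (items.getD m "") < key (items.getD j ""))
             || (decide (key (items.getD m "") = key (items.getD j "")) && decide (m < j)))))
    (j : Nat) (hj : j < items.length) (hpj : p (items.getD j "") = true) :
    pvRank items j
    = pvSrank key (items.filter p) ((items.filter p).getD ((items.take j).countP p) "")
        ((items.take j).countP p) := by
  have hys : (items.filter p).getD ((items.take j).countP p) "" = items.getD j "" := by
    have hp' : p items[j] = true := by
      rw [← List.getD_eq_getElem _ _ hj]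
      exact hpj
    have h := pv_filter_getElem_cnt p items j hj hp'
    rw [List.getD_eq_getElem?_getD, h]
    rw [List.getD_eq_getElem _ _ hj]
    rfl
  unfold pvRank
  have step1 : (List.range items.length).countP (pvCond items j)
      = (List.range items.length).countP (fun m =>
          (p (items.getD m "") && decide (key (items.getD m "") < key (items.getD j "")))
          || (decide (m < j)
              && (p (items.getD m "") && decide (key (items.getD m "") = key (items.getD j ""))))) := by
    apply List.countP_congr
    intro m hmm
    rw [hcond m j (List.mem_range.mp hmm) hj hpj]
    rw [pv_bool_distrib]
  rw [step1]
  rw [pv_countP_or_disjoint _ _ _ (by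
    intro m _ hboth
    obtain ⟨h1, h2⟩ := hboth
    simp only [Bool.and_eq_true, decide_eq_true_eq] at h1 h2
    exact absurd h2.2.2 (ne_of_lt h1.2))]
  have sum1 : (List.range items.length).countP (fun m =>
        p (items.getD m "") && decide (key (items.getD m "") < key (items.getD j "")))
      = (items.filter p).countP (fun o => decide (key o < key (items.getD j ""))) := by
    rw [pv_countP_range_getD items "" (fun s => p s && decide (key s < key (items.getD j "")))]
    rw [List.countP_filter]
    apply List.countP_congr
    intro s _
    rw [Bool.and_comm]
  have sum2 : (List.range items.length).countP (fun m =>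
        decide (m < j)
        && (p (items.getD m "") && decide (key (items.getD m "") = key (items.getD j ""))))
      = ((items.filter p).take ((items.take j).countP p)).countP
          (fun o => decide (key o = key (items.getD j ""))) := by
    rw [pv_countP_range_lt items.length j (le_of_lt hj)]
    rw [pv_countP_range_getD_take items ""
      (fun s => p s && decide (key s = key (items.getD j ""))) j (le_of_lt hj)]
    conv_rhs => rw [← pv_filter_take p items j]
    rw [List.countP_filter]
    apply List.countP_congr
    intro s _
    rw [Bool.and_comm]
  rw [sum1, sum2]
  unfold pvSrank
  rw [hys]

theorem pv_val_true (items : List String) (j : Nat) (hjn : j < items.length)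
    (hpj : pyLastDigit (items.getD j "") = true) (r : Nat)
    (hrank : pvRank items j = r) :
    (pvNs items).getD r 0 = pyParseInt (items.getD j "") := by
  have hc : (items.take j).countP pyLastDigit < (items.filter pyLastDigit).length :=
    pv_cnt_lt_filter pyLastDigit items "" j hjn hpj
  have hrank2 : pvRank items j
      = pvSrank pyParseInt (items.filter pyLastDigit)
          ((items.filter pyLastDigit).getD ((items.take j).countP pyLastDigit) "")
          ((items.take j).countP pyLastDigit) :=
    pv_rank_srank items pyLastDigit pyParseInt
      (fun m j hm hj hpj => pv_cond_char_true items m j hm hj hpj) j hjn hpj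
  have hget := pv_srank_get pyParseInt "" (items.filter pyLastDigit)
    ((items.take j).countP pyLastDigit) hc
  have hysc : (items.filter pyLastDigit)[(items.take j).countP pyLastDigit]?
      = some (items.getD j "") := by
    have hp' : pyLastDigit items[j] = true := by
      rw [← List.getD_eq_getElem _ _ hjn]; exact hpj
    have h := pv_filter_getElem_cnt pyLastDigit items j hjn hp'
    rw [h, List.getD_eq_getElem _ _ hjn]
  have hns : pvNs items = ((PySem.List.sorted (items.filter pyLastDigit) pyParseInt false).map pyParseInt) := by
    unfold pvNs
    exact pv_sorted_map pyParseInt (items.filter pyLastDigit)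
  rw [← hrank, hrank2, hns]
  rw [List.getD_eq_getElem?_getD, List.getElem?_map, hget, hysc]
  rfl

theorem pv_val_false (items : List String) (j : Nat) (hjn : j < items.length)
    (hpj : (!pyLastDigit (items.getD j "")) = true) (r : Nat)
    (hrank : pvRank items j = r) :
    (pvWs items).getD r "" = items.getD j "" := by
  have hc : (items.take j).countP (fun s => !pyLastDigit s)
      < (items.filter (fun s => !pyLastDigit s)).length :=
    pv_cnt_lt_filter (fun s => !pyLastDigit s) items "" j hjn hpj
  have hrank2 : pvRank items j
      = pvSrank (fun w => PySem.Str.lower w) (items.filter (fun s => !pyLastDigit s))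
          ((items.filter (fun s => !pyLastDigit s)).getD
            ((items.take j).countP (fun s => !pyLastDigit s)) "")
          ((items.take j).countP (fun s => !pyLastDigit s)) :=
    pv_rank_srank items (fun s => !pyLastDigit s) (fun w => PySem.Str.lower w)
      (fun m j hm hj hpj => pv_cond_char_false items m j hm hj hpj) j hjn hpj
  have hget := pv_srank_get (fun w => PySem.Str.lower w) "" (items.filter (fun s => !pyLastDigit s))
    ((items.take j).countP (fun s => !pyLastDigit s)) hc
  have hysc : (items.filter (fun s => !pyLastDigit s))[(items.take j).countP (fun s => !pyLastDigit s)]?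
      = some (items.getD j "") := by
    have hp' : (!pyLastDigit items[j]) = true := by
      rw [← List.getD_eq_getElem _ _ hjn]; exact hpj
    have h := pv_filter_getElem_cnt (fun s => !pyLastDigit s) items j hjn hp'
    rw [h, List.getD_eq_getElem _ _ hjn]
  rw [← hrank, hrank2]
  unfold pvWs
  rw [List.getD_eq_getElem?_getD, hget, hysc]
  rfl

-- existence + value at one slot
theorem pv_chunk_eq (items : List String) (q : Nat) (hq : q < items.length) :
    pvChunk items (pvP items q)
      (if pvP items q then pvCntT items q else pvCntF items q) = [pvG items q] := by
  have hqflag : pvP items q = pyLastDigit (items.getD q "") :=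
    pv_getD_map pyLastDigit items q false "" hq
  cases ht : pvP items q with
  | true =>
    have hq' : pyLastDigit (items.getD q "") = true := by rw [← hqflag]; exact ht
    have hr : pvCntT items q = (items.take q).countP pyLastDigit :=
      pv_cntT_take items q (le_of_lt hq)
    have hrlt : (items.take q).countP pyLastDigit < (items.filter pyLastDigit).length :=
      pv_cnt_lt_filter pyLastDigit items "" q hq hq'
    obtain ⟨p0, hp0, hsr⟩ := pv_srank_surj pyParseInt "" (items.filter pyLastDigit)
      ((items.take q).countP pyLastDigit) hrlt
    obtain ⟨j0, hj0, hpj0, hcnt0⟩ := pv_filter_pos_inv pyLastDigit items p0 hp0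
    have hrank0 : pvRank items j0 = (items.take q).countP pyLastDigit := by
      have h := pv_rank_srank items pyLastDigit pyParseInt
        (fun m j hm hj hpj => pv_cond_char_true items m j hm hj hpj) j0 hj0 hpj0
      rw [h, hcnt0]
      exact hsr
    have hfs : (pvFind items true ((items.take q).countP pyLastDigit)).isSome := by
      unfold pvFind
      rw [List.find?_isSome]
      refine ⟨j0, List.mem_range.mpr hj0, ?_⟩
      have hpv0 : pvP items j0 = true := by
        show (items.map pyLastDigit).getD j0 false = true
        rw [pv_getD_map pyLastDigit items j0 false "" hj0]
        exact hpj0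
      simp [hpv0, hrank0]
    obtain ⟨j, hfj⟩ := Option.isSome_iff_exists.mp hfs
    have hjn : j < items.length := by
      have := List.mem_of_find?_eq_some hfj
      exact List.mem_range.mp this
    have hpred := List.find?_some hfj
    have hpvj : pvP items j = true := by
      have := (Bool.and_eq_true _ _).mp hpred |>.1
      simpa using this
    have hrankj : pvRank items j = (items.take q).countP pyLastDigit := by
      have := (Bool.and_eq_true _ _).mp hpred |>.2
      simpa using this
    have hpjd : pyLastDigit (items.getD j "") = true := by
      rw [← pv_getD_map pyLastDigit items j false "" hjn]
      exact hpvj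
    simp only [pvChunk, ht, if_pos, hr, hfj, pvVal]
    have hv := pv_val_true items j hjn hpjd _ hrankj
    rw [pvG, if_pos ht, hr, hv]
  | false =>
    have hq' : (!pyLastDigit (items.getD q "")) = true := by
      rw [← hqflag, ht]; rfl
    have hr : pvCntF items q = (items.take q).countP (fun s => !pyLastDigit s) :=
      pv_cntF_take items q (le_of_lt hq)
    have hrlt : (items.take q).countP (fun s => !pyLastDigit s)
        < (items.filter (fun s => !pyLastDigit s)).length :=
      pv_cnt_lt_filter (fun s => !pyLastDigit s) items "" q hq hq'
    obtain ⟨p0, hp0, hsr⟩ := pv_srank_surj (fun w => PySem.Str.lower w) ""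
      (items.filter (fun s => !pyLastDigit s))
      ((items.take q).countP (fun s => !pyLastDigit s)) hrlt
    obtain ⟨j0, hj0, hpj0, hcnt0⟩ := pv_filter_pos_inv (fun s => !pyLastDigit s) items p0 hp0
    have hrank0 : pvRank items j0 = (items.take q).countP (fun s => !pyLastDigit s) := by
      have h := pv_rank_srank items (fun s => !pyLastDigit s) (fun w => PySem.Str.lower w)
        (fun m j hm hj hpj => pv_cond_char_false items m j hm hj hpj) j0 hj0 hpj0
      rw [h, hcnt0]
      exact hsr
    have hfs : (pvFind items false ((items.take q).countP (fun s => !pyLastDigit s))).isSome := by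
      unfold pvFind
      rw [List.find?_isSome]
      refine ⟨j0, List.mem_range.mpr hj0, ?_⟩
      have hpv0 : pvP items j0 = false := by
        show (items.map pyLastDigit).getD j0 false = false
        rw [pv_getD_map pyLastDigit items j0 false "" hj0]
        simpa using hpj0
      simp [hpv0, hrank0]
    obtain ⟨j, hfj⟩ := Option.isSome_iff_exists.mp hfs
    have hjn : j < items.length := by
      have := List.mem_of_find?_eq_some hfj
      exact List.mem_range.mp this
    have hpred := List.find?_some hfj
    have hpvj : pvP items j = false := by
      have := (Bool.and_eq_true _ _).mp hpred |>.1
      simpa using this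
    have hrankj : pvRank items j = (items.take q).countP (fun s => !pyLastDigit s) := by
      have := (Bool.and_eq_true _ _).mp hpred |>.2
      simpa using this
    have hpjd : (!pyLastDigit (items.getD j "")) = true := by
      have h2 : (items.map pyLastDigit).getD j false = false := hpvj
      rw [pv_getD_map pyLastDigit items j false "" hjn] at h2
      rw [h2]
      rfl
    simp only [pvChunk, ht, hr, pvVal, Bool.false_eq_true, if_false]
    rw [hfj]
    have hv := pv_val_false items j hjn hpjd _ hrankj
    show [items.getD j ""] = [pvG items q]
    rw [pvG, if_neg (by simp [ht]), hr, hv]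

theorem pv_main (items : List String) :
    scramble_sorted items = scramble_sorted_alt items := by
  rw [pv_A_eq, pv_B_eq, List.map_eq_flatMap]
  rw [List.flatMap_def, List.flatMap_def]
  congr 1
  apply List.map_congr_left
  intro q hq
  exact (pv_chunk_eq items q (List.mem_range.mp hq)).symm

-- ===== VERDICT (by name: the statement is the Claim_ definition above) =====
theorem scramble_sorted_spec : Claim_equal_scramble_sorted := by
  intro items _ _
  show scramble_sorted items = scramble_sorted_alt items
  exact pv_main items
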